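-- pv_equiv track=rewrite | github.com/IgorKwiatkowski/bitesofpy | bite_29.py | get_index_different_char
-- ===== SOURCE A (Python) =====
-- def get_index_different_char(chars):
--     alpha_counter = 0
--     non_alpha_counter = 0
--     for char in chars:
--         if str(char) == '' or str(char) not in 'abcdefghijklmnopqrstuvwxyzABCDEFGHIJKLMNOPQRSTUVWXYZ0123456789':
--             non_alpha_counter += 1
--         else:
--             alpha_counter += 1
--
--     if alpha_counter > 1:
--         for idx, char in enumerate(chars):
--             if str(char) not in 'abcdefghijklmnopqrstuvwxyzABCDEFGHIJKLMNOPQRSTUVWXYZ0123456789':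
--                 return idx
--
--     else:
--         for idx, char in enumerate(chars):
--             if str(char) != '' and str(char) in 'abcdefghijklmnopqrstuvwxyzABCDEFGHIJKLMNOPQRSTUVWXYZ0123456789':
--                 return idx
-- ===== SOURCE B (Python) =====
-- ALNUM = 'abcdefghijklmnopqrstuvwxyzABCDEFGHIJKLMNOPQRSTUVWXYZ0123456789'
--
-- def get_index_different_char(chars):
--     # Single reverse pass: walk the sequence right-to-left keeping the earliest
--     # alpha index, the earliest non-alpha index and the alpha count, then pick.
--     first_alpha = None
--     first_non = None
--     alpha_count = 0
--     for idx, c in reversed(list(enumerate(chars))):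
--         s = str(c)
--         if s == '':
--             pass
--         elif s in ALNUM:
--             first_alpha = idx
--             alpha_count += 1
--         else:
--             first_non = idx
--     return first_non if alpha_count > 1 else first_alpha
-- ===== Notes on version B (the rewrite author's own statement) =====
-- stated objective: alternative
-- what changed: A makes a counting pass and then one of two early-return rescans of the list; B makes a single right-to-left pass over reversed(enumerate(chars)) maintaining the earliest alpha index, earliest non-alpha index and alpha count in an accumulator, and selects at the end with no rescan and no early return.
import Mathlib
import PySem

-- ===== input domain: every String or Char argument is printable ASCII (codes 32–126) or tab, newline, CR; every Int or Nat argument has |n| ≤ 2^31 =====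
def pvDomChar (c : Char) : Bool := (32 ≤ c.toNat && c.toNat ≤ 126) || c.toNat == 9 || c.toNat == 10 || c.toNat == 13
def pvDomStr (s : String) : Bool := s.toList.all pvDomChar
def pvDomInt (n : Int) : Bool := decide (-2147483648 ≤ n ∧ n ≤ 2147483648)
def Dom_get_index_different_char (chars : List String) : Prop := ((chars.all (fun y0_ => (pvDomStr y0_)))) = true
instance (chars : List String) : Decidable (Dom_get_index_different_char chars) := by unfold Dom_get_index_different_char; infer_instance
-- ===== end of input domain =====

-- B replaces A's count-then-rescan (three loops, early returns) by one right-to-left pass over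
-- reversed(enumerate(chars)) carrying (first_alpha, first_non, alpha_count) (objective: alternative).

-- ===== PORT A =====
def pvAl : String := "abcdefghijklmnopqrstuvwxyzABCDEFGHIJKLMNOPQRSTUVWXYZ0123456789"

-- first loop of A: the two counters
def pvCount (chars : List String) : Int × Int :=
  chars.foldl (fun ac c =>
    if c == "" || !(PySem.Str.isIn c pvAl) then (ac.1, ac.2 + 1) else (ac.1 + 1, ac.2)) (0, 0)

-- second loop (alpha_counter > 1 branch): first idx with str(char) not in ALNUM
def pvFindNonAl : List String → Nat → Option Int
  | [], _ => none
  | c :: r, i => if !(PySem.Str.isIn c pvAl) then some (i : Int) else pvFindNonAl r (i + 1)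

-- third loop (else branch): first idx with str(char) != '' and str(char) in ALNUM
def pvFindAl : List String → Nat → Option Int
  | [], _ => none
  | c :: r, i => if c != "" && PySem.Str.isIn c pvAl then some (i : Int) else pvFindAl r (i + 1)

def get_index_different_char (chars : List String) : Option Int :=
  let ac := pvCount chars
  if ac.1 > 1 then pvFindNonAl chars 0 else pvFindAl chars 0

-- ===== PORT B =====
-- enumerate(chars)
def pvEnum : List String → Nat → List (Nat × String)
  | [], _ => []
  | c :: r, i => (i, c) :: pvEnum r (i + 1)

-- the body of B's single loop, applied to the running (first_alpha, first_non, alpha_count)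
def pvStep (st : Option Int × Option Int × Int) (p : Nat × String) :
    Option Int × Option Int × Int :=
  if p.2 == "" then st
  else if PySem.Str.isIn p.2 pvAl then (some (p.1 : Int), st.2.1, st.2.2 + 1)
  else (st.1, some (p.1 : Int), st.2.2)

def get_index_different_char_alt (chars : List String) : Option Int :=
  let st := ((pvEnum chars 0).reverse).foldl pvStep (none, none, (0 : Int))
  if st.2.2 > 1 then st.2.1 else st.1

-- ===== PRECONDITION & SPEC =====
def Spec_get_index_different_char (chars : List String) (out : Option Int) : Prop := out = get_index_different_char_alt chars
instance (chars : List String) (out : Option Int) : Decidable (Spec_get_index_different_char chars out) := by unfold Spec_get_index_different_char; infer_instance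

-- ===== CLAIM =====
def Claim_equal_get_index_different_char : Prop := ∀ (chars : List String), Dom_get_index_different_char chars → Spec_get_index_different_char chars (get_index_different_char chars)

-- ===== LEMMAS AND PROOFS =====

-- the empty string is a substring of anything
theorem pvIsIn_empty (s : String) : PySem.Str.isIn "" s = true := by
  rw [PySem.Str.isIn_iff_infix]
  have h : ([] : List Char) <:+: s.toList := List.nil_infix
  simpa using h

-- B's reverse fold computes (A's else-branch scan, A's >1-branch scan, alpha count)
theorem pvFold_eq (chars : List String) : ∀ (i : Nat),
    ((pvEnum chars i).reverse).foldl pvStep (none, none, (0 : Int))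
      = (pvFindAl chars i, pvFindNonAl chars i,
         ((chars.filter (fun c => c != "" && PySem.Str.isIn c pvAl)).length : Int)) := by
  induction chars with
  | nil => intro i; rfl
  | cons c r ih =>
    intro i
    rw [pvEnum, List.reverse_cons, List.foldl_append, ih (i + 1), List.foldl_cons, List.foldl_nil]
    by_cases he : (c == "") = true
    · have hc : c = "" := by simpa using he
      have hin : PySem.Str.isIn c pvAl = true := by rw [hc]; exact pvIsIn_empty _
      have hin' : PySem.Chars.isIn c.toList pvAl.toList = true := by
        simpa [PySem.Str.isIn] using hin
      simp [pvStep, pvFindAl, pvFindNonAl, hc]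
    · have hne : ¬ c = "" := by simpa using he
      by_cases hin : PySem.Str.isIn c pvAl = true
      · have hin' : PySem.Chars.isIn c.toList pvAl.toList = true := by
          simpa [PySem.Str.isIn] using hin
        simp [pvStep, he, hin', pvFindAl, pvFindNonAl, hne]
      · have hin' : PySem.Chars.isIn c.toList pvAl.toList = false := by
          simpa [PySem.Str.isIn] using hin
        simp [pvStep, he, hin', pvFindAl, pvFindNonAl]

-- A's alpha counter counts the strings satisfying the alpha predicate
theorem pvCount_fst (chars : List String) : ∀ (a b : Int),
    (chars.foldl (fun ac c =>
      if c == "" || !(PySem.Str.isIn c pvAl) then (ac.1, ac.2 + 1) else (ac.1 + 1, ac.2)) (a, b)).1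
      = a + ((chars.filter (fun c => c != "" && PySem.Str.isIn c pvAl)).length : Int) := by
  induction chars with
  | nil => intro a b; simp
  | cons c r ih =>
    intro a b
    by_cases h : (c == "" || !(PySem.Str.isIn c pvAl)) = true
    · rw [List.foldl_cons, if_pos h, ih, List.filter_cons_of_neg
        (by cases hc : (c == "") <;> cases hi : PySem.Str.isIn c pvAl <;> simp_all [bne])]
    · rw [List.foldl_cons, if_neg h, ih, List.filter_cons_of_pos
        (by cases hc : (c == "") <;> cases hi : PySem.Str.isIn c pvAl <;> simp_all [bne])]
      simp; omega

-- ===== VERDICT =====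
theorem get_index_different_char_spec : Claim_equal_get_index_different_char := by
  intro chars _
  show get_index_different_char chars = get_index_different_char_alt chars
  unfold get_index_different_char get_index_different_char_alt pvCount
  simp only [pvFold_eq chars 0, pvCount_fst chars 0 0]
  simp
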